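-- pv_equiv track=rewrite | github.com/laredo77/N-Queens | n_queens.py | is_goal_state
-- ===== SOURCE A (Python) =====
-- def is_goal_state(state):
--     a, b, c = (set() for i in range(3))
--     for row, col in enumerate(state):
--         if col in a or row - col in b or row + col in c:
--             return False
--         a.add(col)
--         b.add(row - col)
--         c.add(row + col)
--     return True
-- ===== SOURCE B (Python) =====
-- def _distinct(xs):
--     ys = sorted(xs)
--     return all(x != y for x, y in zip(ys, ys[1:]))
--
--
-- def is_goal_state(state):
--     state = list(state)
--     return (_distinct(state)
--             and _distinct([r - c for r, c in enumerate(state)])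
--             and _distinct([r + c for r, c in enumerate(state)]))
-- ===== Notes on version B (the rewrite author's own statement) =====
-- stated objective: alternative
-- what changed: Replaces A's hash-set single pass with membership tests and early exit by a sort-based duplicate check: build the column/diff/sum lists, sort each, and verify no two adjacent sorted elements are equal.
import Mathlib
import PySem

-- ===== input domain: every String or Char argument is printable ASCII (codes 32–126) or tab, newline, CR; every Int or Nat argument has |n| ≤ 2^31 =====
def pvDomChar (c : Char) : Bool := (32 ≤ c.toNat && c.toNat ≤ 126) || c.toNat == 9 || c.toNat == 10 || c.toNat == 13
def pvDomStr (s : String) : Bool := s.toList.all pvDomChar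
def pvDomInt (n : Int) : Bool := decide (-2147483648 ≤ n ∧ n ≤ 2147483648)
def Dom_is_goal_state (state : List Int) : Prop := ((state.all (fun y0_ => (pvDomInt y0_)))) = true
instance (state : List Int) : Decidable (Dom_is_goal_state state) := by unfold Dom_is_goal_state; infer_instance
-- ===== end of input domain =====

-- B replaces A's hash-set single pass (membership tests, early return) by a sort-based
-- duplicate check: sort each of the column/diff/sum lists and test adjacent equality (objective: alternative).

-- ===== PORT A =====
-- the for-loop over enumerate(state) with the three accumulating sets a, b, c
def isGoalGo (row : Int) (a b c : PySem.Set Int) : List Int → Bool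
  | [] => true
  | col :: rest =>
    if a.contains col || b.contains (row - col) || c.contains (row + col) then false
    else isGoalGo (row + 1) (a.add col) (b.add (row - col)) (c.add (row + col)) rest

def is_goal_state (state : List Int) : Bool :=
  isGoalGo 0 PySem.Set.empty PySem.Set.empty PySem.Set.empty state

-- ===== PORT B =====
-- _distinct(xs): sort, then all(x != y for x, y in zip(ys, ys[1:]))
def pvDistinct (xs : List Int) : Bool :=
  let ys := PySem.List.sorted xs (fun x => x) false
  (ys.zip ys.tail).all (fun p => p.1 != p.2)

def is_goal_state_alt (state : List Int) : Bool :=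
  pvDistinct state &&
  (pvDistinct ((PySem.List.enumerate state).map (fun p => p.1 - p.2)) &&
   pvDistinct ((PySem.List.enumerate state).map (fun p => p.1 + p.2)))

-- ===== PRECONDITION & SPEC =====
def Spec_is_goal_state (state : List Int) (out : Bool) : Prop := out = is_goal_state_alt state
instance (state : List Int) (out : Bool) : Decidable (Spec_is_goal_state state out) := by unfold Spec_is_goal_state; infer_instance

-- ===== CLAIM (what is proved, stated in full; the proofs are below) =====
def Claim_equal_is_goal_state : Prop := ∀ (state : List Int), Dom_is_goal_state state → Spec_is_goal_state state (is_goal_state state)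

-- ===== LEMMAS AND PROOFS =====

theorem contains_eq_mem (s : PySem.Set Int) (x : Int) :
    s.contains x = true ↔ x ∈ s := by
  simp [PySem.Set.contains]

theorem add_of_not_mem (s : PySem.Set Int) (x : Int) (h : x ∉ s) :
    s.add x = s ++ [x] := by
  simp [PySem.Set.add, PySem.Set.contains, h]

-- characterisation of A's loop
theorem isGoalGo_iff (l : List Int) : ∀ (row : Int) (a b c : PySem.Set Int),
    a.Nodup → b.Nodup → c.Nodup →
    (isGoalGo row a b c l = true ↔
      ((a ++ l).Nodup ∧
       (b ++ (PySem.List.enumerate l row).map (fun p => p.1 - p.2)).Nodup ∧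
       (c ++ (PySem.List.enumerate l row).map (fun p => p.1 + p.2)).Nodup)) := by
  induction l with
  | nil =>
    intro row a b c ha hb hc
    simp [isGoalGo, PySem.List.enumerate_nil, ha, hb, hc]
  | cons col rest ih =>
    intro row a b c ha hb hc
    rw [isGoalGo]
    by_cases hcond : (a.contains col || b.contains (row - col) || c.contains (row + col)) = true
    · rw [if_pos hcond]
      simp only [Bool.or_eq_true, contains_eq_mem] at hcond
      simp only [Bool.false_eq_true, false_iff]
      intro ⟨h1, h2, h3⟩
      rw [PySem.List.enumerate_cons] at h2 h3
      rcases hcond with (h | h) | h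
      · exact (List.disjoint_of_nodup_append h1) h (by simp)
      · exact (List.disjoint_of_nodup_append h2) h (by simp)
      · exact (List.disjoint_of_nodup_append h3) h (by simp)
    · rw [if_neg hcond]
      simp only [Bool.or_eq_true, contains_eq_mem] at hcond
      push Not at hcond
      obtain ⟨⟨hca, hcb⟩, hcc⟩ := hcond
      have ha' := PySem.Set.nodup_add a col ha
      have hb' := PySem.Set.nodup_add b (row - col) hb
      have hc' := PySem.Set.nodup_add c (row + col) hc
      rw [ih (row + 1) _ _ _ ha' hb' hc',
          add_of_not_mem a col hca, add_of_not_mem b (row - col) hcb,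
          add_of_not_mem c (row + col) hcc,
          PySem.List.enumerate_cons]
      simp [List.append_assoc]

-- zip-with-tail adjacency test is IsChain (· ≠ ·)
theorem all_zip_tail_iff_chain' (ys : List Int) :
    ((ys.zip ys.tail).all (fun p => p.1 != p.2)) = true ↔ ys.IsChain (· ≠ ·) := by
  induction ys with
  | nil => simp
  | cons a t ih =>
    cases t with
    | nil => simp
    | cons b u =>
      simp only [List.tail_cons, List.zip_cons_cons, List.all_cons, Bool.and_eq_true,
        List.isChain_cons_cons, bne_iff_ne] at *
      exact and_congr Iff.rfl ih

-- a sorted list with no equal adjacent elements has no duplicates at all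
theorem chain'_ne_sorted_nodup (ys : List Int) (hs : ys.Pairwise (· ≤ ·)) :
    ys.IsChain (· ≠ ·) ↔ ys.Nodup := by
  constructor
  · intro hc
    have hle : ys.IsChain (· ≤ ·) := hs.isChain
    have hlt : ys.IsChain (· < ·) := by
      rw [List.isChain_iff_getElem] at hc hle ⊢
      intro i h
      exact lt_of_le_of_ne (hle i h) (hc i h)
    have : ys.Pairwise (· < ·) := (List.isChain_iff_pairwise).mp hlt
    exact this.imp ne_of_lt
  · intro hn
    exact hn.isChain

theorem pvDistinct_iff_nodup (xs : List Int) :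
    pvDistinct xs = true ↔ xs.Nodup := by
  unfold pvDistinct
  rw [all_zip_tail_iff_chain',
      chain'_ne_sorted_nodup _ (PySem.List.sorted_pairwise xs (fun x => x)),
      (PySem.List.sorted_perm xs (fun x => x) false).nodup_iff]

theorem is_goal_state_eq (state : List Int) :
    is_goal_state state = is_goal_state_alt state := by
  have hA := isGoalGo_iff state 0 PySem.Set.empty PySem.Set.empty PySem.Set.empty
      List.nodup_nil List.nodup_nil List.nodup_nil
  have hempty : (PySem.Set.empty : PySem.Set Int) = [] := rfl
  rw [hempty] at hA
  simp only [List.nil_append] at hA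
  have hB : is_goal_state_alt state = true ↔
      (state.Nodup ∧
       ((PySem.List.enumerate state).map (fun p => p.1 - p.2)).Nodup ∧
       ((PySem.List.enumerate state).map (fun p => p.1 + p.2)).Nodup) := by
    simp only [is_goal_state_alt, Bool.and_eq_true, pvDistinct_iff_nodup]
  have : is_goal_state state = true ↔ is_goal_state_alt state = true := by
    rw [hB]; exact hA
  cases hx : is_goal_state state <;> cases hy : is_goal_state_alt state <;>
    simp_all

-- ===== VERDICT (by name: the statement is the Claim_ definition above) =====
theorem is_goal_state_spec : Claim_equal_is_goal_state := by
  intro state _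
  exact is_goal_state_eq state
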